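-- pv_equiv track=rewrite | github.com/nicolasgallandpro/dagyter | dagyter.py | dag_conf_to_dependencies
-- ===== SOURCE A (Python) =====
-- def dag_conf_to_dependencies(conf):
--     """take the toml conf of the dag and create a dependency object of this form:
--     {'first_step.ipynb': [], 'second_step.ipynb': ['first_step.ipynb'], 'third_step.ipynb': ['second_step.ipynb']}"""
--     dependencies = {}
--     #step 1 : list all dependencies
--     for line in conf['dag'].split('\n'):
--         line = line.strip()
--         if line == '':
--             continue
--         previous = None
--         for node_file in line.split('>>'):
--             node_file = node_file.strip()
--             if node_file not in dependencies:
--                 dependencies[node_file] = []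
--             if previous != None:
--                 (dependencies[node_file]).append(previous)
--             previous = node_file
--     return dependencies
-- ===== SOURCE B (Python) =====
-- def dag_conf_to_dependencies(conf):
--     """take the toml conf of the dag and create a dependency object of this form:
--     {'first_step.ipynb': [], 'second_step.ipynb': ['first_step.ipynb'], 'third_step.ipynb': ['second_step.ipynb']}"""
--     # Stage 1: parse the whole text into chains (lists of stripped node names).
--     chains = [[part.strip() for part in line.split('>>')]
--               for line in map(str.strip, conf['dag'].split('\n')) if line != '']
--     # Stage 2: global first-occurrence order of all nodes.
--     order = []
--     seen = set()
--     for chain in chains: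
--         for node in chain:
--             if node not in seen:
--                 seen.add(node)
--                 order.append(node)
--     # Stage 3: one global edge list, then group it by target with a comprehension.
--     edges = [pair for chain in chains for pair in zip(chain, chain[1:])]
--     return {node: [src for src, tgt in edges if tgt == node] for node in order}
-- ===== Notes on version B (the rewrite author's own statement) =====
-- stated objective: alternative
-- what changed: Instead of A's single interleaved scan that mutates the dict while carrying a `previous` accumulator, B parses the text into chains, computes the global first-occurrence node order, collects one global edge list, and builds the result in one shot by grouping that edge list by target with a dict comprehension; it trades the incremental dict updates for a per-key filter over the edge list.
import Mathlib
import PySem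

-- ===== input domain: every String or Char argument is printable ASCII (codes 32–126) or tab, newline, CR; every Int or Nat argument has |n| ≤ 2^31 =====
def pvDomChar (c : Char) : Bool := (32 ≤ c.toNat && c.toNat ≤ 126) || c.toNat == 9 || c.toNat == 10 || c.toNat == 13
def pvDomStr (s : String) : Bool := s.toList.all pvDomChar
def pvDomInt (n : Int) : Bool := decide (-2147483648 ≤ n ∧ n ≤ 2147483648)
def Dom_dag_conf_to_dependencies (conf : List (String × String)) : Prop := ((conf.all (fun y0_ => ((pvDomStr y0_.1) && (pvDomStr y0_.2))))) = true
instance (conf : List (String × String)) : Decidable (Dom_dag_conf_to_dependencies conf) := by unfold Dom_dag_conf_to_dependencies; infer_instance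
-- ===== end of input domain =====

-- B replaces A's incremental dict building with a carried `previous` by three staged global passes:
-- parse all chains, compute the first-occurrence node order, collect one global edge list and group it
-- by target with a filter (objective: alternative decomposition, same asymptotic cost up to the grouping).

-- ===== PORT A =====
-- inner loop body of A: strip the piece, create the key if absent, append `previous` if set
def pvStepA (st : PySem.Dict String (List String) × Option String) (node_file : String) :
    PySem.Dict String (List String) × Option String :=
  let node := PySem.Str.strip node_file
  let d := if st.1.contains node then st.1 else st.1.insert node []
  match st.2 with
  | none => (d, some node)
  | some p => (d.modify node [] (· ++ [p]), some node)

-- outer loop body of A: strip the line, skip if empty, fold the '>>' pieces with previous = None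
def pvLineA (d : PySem.Dict String (List String)) (line : String) : PySem.Dict String (List String) :=
  let l := PySem.Str.strip line
  if l == "" then d
  else (((PySem.Str.split? l ">>").getD []).foldl pvStepA (d, none)).1

def dag_conf_to_dependencies (conf : List (String × String)) : List (String × List String) :=
  let dag := (conf.lookup "dag").getD ""
  (((PySem.Str.split? dag "\n").getD []).foldl pvLineA PySem.Dict.empty).items

-- ===== PORT B =====
-- stage 1 of B: all lines stripped, empty ones dropped, each remaining line split into stripped tokens
def pvChains (dag : String) : List (List String) :=
  (((PySem.Str.split? dag "\n").getD []).map PySem.Str.strip).filterMap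
    (fun line => if line == "" then none
                 else some (((PySem.Str.split? line ">>").getD []).map PySem.Str.strip))

-- stage 2 of B: the `seen`-set/`order`-list step of the first-occurrence pass
def pvOrderStep (st : PySem.Set String × List String) (node : String) :
    PySem.Set String × List String :=
  if PySem.Set.contains st.1 node then st else (PySem.Set.add st.1 node, st.2 ++ [node])

def dag_conf_to_dependencies_alt (conf : List (String × String)) : List (String × List String) :=
  let dag := (conf.lookup "dag").getD ""
  let chains := pvChains dag
  let order := (chains.foldl (fun st chain => chain.foldl pvOrderStep st) (PySem.Set.empty, [])).2
  let edges := chains.flatMap (fun chain => chain.zip chain.tail)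
  (order.foldl
    (fun d node => d.insert node ((edges.filter (fun e => e.2 == node)).map Prod.fst))
    PySem.Dict.empty).items

-- ===== PRECONDITION & SPEC =====
-- A raises KeyError when conf has no 'dag' key; Pre_ excludes exactly those inputs.
def Pre_dag_conf_to_dependencies (conf : List (String × String)) : Prop :=
  ((conf.map Prod.fst).contains "dag") = true
instance (conf : List (String × String)) : Decidable (Pre_dag_conf_to_dependencies conf) := by
  unfold Pre_dag_conf_to_dependencies; infer_instance
def pvWitness_dag_conf_to_dependencies : (List (String × String)) :=
  [("dag", "a.ipynb >> b.ipynb\nb.ipynb >> c.ipynb")]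

def Spec_dag_conf_to_dependencies (conf : List (String × String)) (out : List (String × List String)) : Prop := out = dag_conf_to_dependencies_alt conf
instance (conf : List (String × String)) (out : List (String × List String)) : Decidable (Spec_dag_conf_to_dependencies conf out) := by unfold Spec_dag_conf_to_dependencies; infer_instance

-- ===== CLAIM =====
def Claim_equal_dag_conf_to_dependencies : Prop := ∀ (conf : List (String × String)), Dom_dag_conf_to_dependencies conf → Pre_dag_conf_to_dependencies conf → Spec_dag_conf_to_dependencies conf (dag_conf_to_dependencies conf)

-- ===== LEMMAS AND PROOFS =====

-- A's inner step on an already-stripped token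
def pvStepA' (st : PySem.Dict String (List String) × Option String) (n : String) :
    PySem.Dict String (List String) × Option String :=
  let d := if st.1.contains n then st.1 else st.1.insert n []
  match st.2 with
  | none => (d, some n)
  | some p => (d.modify n [] (· ++ [p]), some n)

-- one chain folded by A, with previous = None
def pvChainA (d : PySem.Dict String (List String)) (c : List String) :
    PySem.Dict String (List String) :=
  (c.foldl pvStepA' (d, none)).1

-- the edge pairs A records while folding c with a given `previous`
def pvPairs (prev : Option String) (c : List String) : List (String × String) :=
  match prev with
  | none => c.zip c.tail
  | some p => (p :: c).zip c

theorem pv_lineA_eq (d : PySem.Dict String (List String)) (line : String) :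
    pvLineA d line =
      (if PySem.Str.strip line == "" then d
       else pvChainA d (((PySem.Str.split? (PySem.Str.strip line) ">>").getD []).map PySem.Str.strip)) := by
  unfold pvLineA pvChainA
  by_cases h : PySem.Str.strip line == "" <;> simp only [h, if_true, Bool.false_eq_true, if_false]
  rw [List.foldl_map]
  rfl

theorem pv_foldA_filterMap (lines : List String) (d : PySem.Dict String (List String)) :
    lines.foldl pvLineA d =
      ((lines.map PySem.Str.strip).filterMap
        (fun line => if line == "" then none
                     else some (((PySem.Str.split? line ">>").getD []).map PySem.Str.strip))).foldl
        pvChainA d := by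
  induction lines generalizing d with
  | nil => rfl
  | cons l ls ih =>
    simp only [List.foldl_cons, List.map_cons]
    rw [pv_lineA_eq]
    by_cases h : PySem.Str.strip l == ""
    · rw [if_pos h, List.filterMap_cons_none (by rw [if_pos h]), ih]
    · rw [if_neg h, List.filterMap_cons_some (by rw [if_neg h]), List.foldl_cons, ih]

-- keys after A's inner fold: set-update with the chain's tokens
theorem pv_keys_foldA (c : List String) (d : PySem.Dict String (List String)) (prev : Option String) :
    ((c.foldl pvStepA' (d, prev)).1).keys = PySem.Set.update d.keys c := by
  induction c generalizing d prev with
  | nil => cases prev <;> rfl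
  | cons n c ih =>
    have hkeys : ∀ st : PySem.Dict String (List String) × Option String,
        ((pvStepA' st n).1).keys = PySem.Set.add st.1.keys n := by
      intro st
      unfold pvStepA'
      by_cases h : st.1.contains n = true
      · have hmem : n ∈ st.1.keys := (PySem.Dict.contains_iff_mem_keys st.1 n).mp h
        rw [PySem.Set.add_of_mem hmem]
        cases st.2 with
        | none => simp [h]
        | some p =>
          simp only [h, if_true]
          rw [PySem.Dict.keys_modify, PySem.Dict.keys_insert_of_contains _ _ h]
      · have h' : st.1.contains n = false := eq_false_of_ne_true h
        have hmem : n ∉ st.1.keys := fun hm =>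
          h ((PySem.Dict.contains_iff_mem_keys st.1 n).mpr hm)
        rw [PySem.Set.add_of_not_mem hmem]
        cases st.2 with
        | none =>
          simp only [h', Bool.false_eq_true, if_false]
          exact PySem.Dict.keys_insert_of_not_contains _ _ h'
        | some p =>
          simp only [h', Bool.false_eq_true, if_false]
          rw [PySem.Dict.keys_modify, PySem.Dict.insert_insert_self]
          exact PySem.Dict.keys_insert_of_not_contains _ _ h'
    simp only [List.foldl_cons]
    have h2 := ih (pvStepA' (d, prev) n).1 (pvStepA' (d, prev) n).2
    rw [Prod.mk.eta] at h2
    rw [h2, hkeys, PySem.Set.update_cons]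

-- values after A's inner fold: old value plus the newly recorded predecessors of x
theorem pv_getD_foldA (c : List String) (d : PySem.Dict String (List String)) (prev : Option String)
    (x : String) :
    ((c.foldl pvStepA' (d, prev)).1).getD x [] =
      d.getD x [] ++ ((pvPairs prev c).filter (fun e => e.2 == x)).map Prod.fst := by
  induction c generalizing d prev with
  | nil => cases prev <;> simp [pvPairs]
  | cons n c ih =>
    have hgd : ∀ (d : PySem.Dict String (List String)),
        (if d.contains n then d else d.insert n []).getD x [] = d.getD x [] := by
      intro d
      by_cases h : d.contains n = true
      · rw [if_pos h]
      · have h' : d.contains n = false := eq_false_of_ne_true h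
        rw [if_neg h, PySem.Dict.getD_insert]
        by_cases hx : x = n
        · subst hx
          rw [if_pos rfl, PySem.Dict.getD_of_not_contains d [] h']
        · rw [if_neg hx]
    cases prev with
    | none =>
      simp only [List.foldl_cons, pvStepA']
      rw [ih]
      simp only [pvPairs, List.tail_cons, hgd]
    | some p =>
      simp only [List.foldl_cons, pvStepA']
      rw [ih]
      have hmod : ((if d.contains n then d else d.insert n []).modify n [] (· ++ [p])).getD x [] =
          d.getD x [] ++ (if ((p, n).2 == x) = true then [p] else []) := by
        rw [PySem.Dict.getD_modify]
        by_cases hx : x = n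
        · subst hx
          rw [if_pos rfl, hgd d]
          simp
        · have hnx : ((p, n).2 == x) = false := beq_eq_false_iff_ne.mpr (fun h => hx h.symm)
          rw [if_neg hx, hgd d, hnx]
          simp
      rw [hmod]
      have hpairs : pvPairs (some p) (n :: c) = (p, n) :: pvPairs (some n) c := rfl
      rw [hpairs, List.filter_cons]
      by_cases hnx : ((p, n).2 == x) = true
      · rw [if_pos hnx, hnx]
        simp [List.append_assoc]
      · rw [if_neg hnx, eq_false_of_ne_true hnx]
        simp

-- outer fold of A over the chains: keys
theorem pv_keys_chains (cs : List (List String)) (d : PySem.Dict String (List String)) :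
    (cs.foldl pvChainA d).keys = cs.foldl (fun ks c => PySem.Set.update ks c) d.keys := by
  induction cs generalizing d with
  | nil => rfl
  | cons c cs ih =>
    simp only [List.foldl_cons]
    rw [ih, pvChainA, pv_keys_foldA]

-- outer fold of A over the chains: values, grouped from the global edge list
theorem pv_getD_chains (cs : List (List String)) (d : PySem.Dict String (List String)) (x : String) :
    (cs.foldl pvChainA d).getD x [] =
      d.getD x [] ++
        (((cs.flatMap (fun c => c.zip c.tail)).filter (fun e => e.2 == x)).map Prod.fst) := by
  induction cs generalizing d with
  | nil => simp
  | cons c cs ih =>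
    simp only [List.foldl_cons, List.flatMap_cons, List.filter_append, List.map_append]
    rw [ih, pvChainA, pv_getD_foldA]
    simp [pvPairs, List.append_assoc]

-- B's first-occurrence pass keeps seen = order, and both equal the set-update fold
theorem pv_order_inner (c : List String) (s : PySem.Set String) :
    c.foldl pvOrderStep (s, s) = (PySem.Set.update s c, PySem.Set.update s c) := by
  induction c generalizing s with
  | nil => rfl
  | cons n c ih =>
    have hstep : pvOrderStep (s, s) n = (PySem.Set.add s n, PySem.Set.add s n) := by
      unfold pvOrderStep
      by_cases h : PySem.Set.contains s n = true
      · rw [if_pos h, PySem.Set.add_of_mem ((PySem.Set.contains_iff s n).mp h)]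
      · rw [if_neg h,
            PySem.Set.add_of_not_mem (fun hmem => h ((PySem.Set.contains_iff s n).mpr hmem))]
    simp only [List.foldl_cons, hstep, ih (PySem.Set.add s n), PySem.Set.update_cons]

theorem pv_order_chains (cs : List (List String)) (s : PySem.Set String) :
    cs.foldl (fun st chain => chain.foldl pvOrderStep st) (s, s) =
      (cs.foldl (fun ks c => PySem.Set.update ks c) s,
       cs.foldl (fun ks c => PySem.Set.update ks c) s) := by
  induction cs generalizing s with
  | nil => rfl
  | cons c cs ih =>
    simp only [List.foldl_cons, pv_order_inner, ih]

-- the fold of set-updates starting from a Nodup list stays Nodup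
theorem pv_nodup_updates (cs : List (List String)) (s : PySem.Set String) (hs : s.Nodup) :
    (cs.foldl (fun ks c => PySem.Set.update ks c) s).Nodup := by
  induction cs generalizing s with
  | nil => exact hs
  | cons c cs ih => exact ih _ (PySem.Set.nodup_update s c hs)

-- building B's dict over the distinct `order` keys appends one item per key
theorem pv_items_fresh (l : List String) (val : String → List String)
    (d : PySem.Dict String (List String)) (h : ∀ a ∈ l, d.contains a = false)
    (hnd : l.Nodup) :
    (l.foldl (fun d n => d.insert n (val n)) d).items = d.items ++ l.map (fun n => (n, val n)) := by
  have := PySem.Dict.items_foldl_insert_fresh (k := fun a => a) (v := fun a => val a)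
    (l := l) (d := d) h (by simpa using hnd)
  simpa using this

-- A's dict over the parsed chains has B's items: order-keys with edges grouped by target
theorem pv_final (cs : List (List String)) :
    (cs.foldl pvChainA PySem.Dict.empty).items =
      ((cs.foldl (fun st chain => chain.foldl pvOrderStep st) (PySem.Set.empty, [])).2.foldl
        (fun d node =>
          d.insert node
            (((cs.flatMap (fun chain => chain.zip chain.tail)).filter (fun e => e.2 == node)).map
              Prod.fst))
        PySem.Dict.empty).items := by
  have hO : (cs.foldl (fun st chain => chain.foldl pvOrderStep st)
      (PySem.Set.empty, ([] : List String))).2 =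
      cs.foldl (fun ks c => PySem.Set.update ks c) ([] : PySem.Set String) :=
    congrArg Prod.snd (pv_order_chains cs [])
  have hnd : (cs.foldl (fun ks c => PySem.Set.update ks c) ([] : PySem.Set String)).Nodup :=
    pv_nodup_updates cs [] List.nodup_nil
  have hkeys : (cs.foldl pvChainA PySem.Dict.empty).keys =
      cs.foldl (fun ks c => PySem.Set.update ks c) ([] : PySem.Set String) := by
    rw [pv_keys_chains]; rfl
  rw [hO, PySem.Dict.items_eq_map_keys _ (by rw [hkeys]; exact hnd) ([] : List String), hkeys,
      pv_items_fresh _ _ _ (fun a _ => PySem.Dict.contains_empty a) hnd,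
      show (PySem.Dict.empty : PySem.Dict String (List String)).items = [] from rfl,
      List.nil_append]
  apply List.map_congr_left
  intro n _
  rw [pv_getD_chains, PySem.Dict.getD_empty, List.nil_append]

-- ===== VERDICT =====
theorem dag_conf_to_dependencies_spec : Claim_equal_dag_conf_to_dependencies := by
  intro conf _ _
  unfold Spec_dag_conf_to_dependencies dag_conf_to_dependencies dag_conf_to_dependencies_alt
  have hlines : ((PySem.Str.split? ((conf.lookup "dag").getD "") "
").getD []).foldl pvLineA
      PySem.Dict.empty =
      (pvChains ((conf.lookup "dag").getD "")).foldl pvChainA PySem.Dict.empty := by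
    rw [pv_foldA_filterMap]; rfl
  exact Eq.trans (congrArg PySem.Dict.items hlines)
    (pv_final (pvChains ((conf.lookup "dag").getD "")))
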